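-- pv_equiv track=rewrite | github.com/qahhor/SFA-routing | backend/app/services/routing/clustering.py | _balance_clusters
-- ===== SOURCE A (Python) =====
-- def _balance_clusters(
--
--     clusters: dict[int, list[int]],
--     max_per_cluster: int,
-- ) -> dict[int, list[int]]:
--     """
--     Balance cluster sizes by redistributing items.
--
--     Moves items from oversized clusters to undersized ones.
--     """
--     # Calculate target size
--     total_items = sum(len(c) for c in clusters.values())
--     n_clusters = len(clusters)
--     target_size = total_items // n_clusters
--
--     # Find over and under filled clusters
--     overfilled = {
--         k: v for k, v in clusters.items()
--         if len(v) > max_per_cluster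
--     }
--     underfilled = {
--         k: v for k, v in clusters.items()
--         if len(v) < target_size * 0.7
--     }
--
--     # Redistribute
--     for over_id, over_items in overfilled.items():
--         excess = over_items[max_per_cluster:]
--         clusters[over_id] = over_items[:max_per_cluster]
--
--         for item in excess:
--             # Find cluster with most capacity
--             min_cluster = min(
--                 clusters.keys(),
--                 key=lambda k: len(clusters[k])
--             )
--             clusters[min_cluster].append(item)
--
--     return clusters
-- ===== SOURCE B (Python) =====
-- def _insort(pq, e):
--     """Insert e into the ascending-sorted list pq, keeping it sorted."""
--     for j, x in enumerate(pq):
--         if e < x: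
--             return pq[:j] + [e] + pq[j:]
--     return pq + [e]
--
--
-- def _remove_idx(pq, i):
--     """Remove the (unique) entry whose index component is i."""
--     for j, x in enumerate(pq):
--         if x[1] == i:
--             return pq[:j] + pq[j + 1:]
--     return pq
--
--
-- def _balance_clusters(
--     clusters: dict[int, list[int]],
--     max_per_cluster: int,
-- ) -> dict[int, list[int]]:
--     """
--     Balance cluster sizes by redistributing items.
--
--     A sorted priority queue keyed by (size, insertion_index) keeps the
--     smallest cluster at the head, instead of a full min() scan per item.
--     """
--     keys = list(clusters.keys())
--     over = [k for k in keys if len(clusters[k]) > max_per_cluster]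
--
--     # priority queue: ascending list of (size, insertion_index, key);
--     # indices are unique, so ties are decided by insertion order
--     pq = sorted((len(clusters[k]), i, k) for i, k in enumerate(keys))
--
--     for k in over:
--         items = clusters[k]
--         excess = items[max_per_cluster:]
--         clusters[k] = items[:max_per_cluster]
--         i = keys.index(k)
--         pq = _insort(_remove_idx(pq, i), (len(clusters[k]), i, k))
--         for item in excess:
--             size, j, kj = pq[0]
--             clusters[kj].append(item)
--             pq = _insort(pq[1:], (size + 1, j, kj))
--
--     return clusters
-- ===== Notes on version B (the rewrite author's own statement) =====
-- stated objective: alternative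
-- what changed: B replaces A's per-item min() scan over all clusters by a priority queue maintained as an ascending sorted list keyed by (size, insertion index), popping the smallest cluster from the head and reinserting it after each move; A's dead code (unused 'underfilled' dict and target_size) is dropped in B.
import Mathlib
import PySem

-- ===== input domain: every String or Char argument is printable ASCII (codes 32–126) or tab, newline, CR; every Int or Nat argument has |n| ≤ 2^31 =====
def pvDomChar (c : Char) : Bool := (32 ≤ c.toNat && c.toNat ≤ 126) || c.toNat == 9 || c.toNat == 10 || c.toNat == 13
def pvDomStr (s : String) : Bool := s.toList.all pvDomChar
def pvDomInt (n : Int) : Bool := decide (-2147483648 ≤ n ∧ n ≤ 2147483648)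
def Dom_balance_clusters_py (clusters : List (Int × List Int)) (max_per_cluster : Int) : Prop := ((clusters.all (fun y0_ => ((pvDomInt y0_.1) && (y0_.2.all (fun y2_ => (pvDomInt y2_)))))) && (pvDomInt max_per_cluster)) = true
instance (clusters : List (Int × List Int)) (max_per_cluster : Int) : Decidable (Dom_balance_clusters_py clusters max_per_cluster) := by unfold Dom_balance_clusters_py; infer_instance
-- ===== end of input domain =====

-- B replaces A's per-item min() scan over the clusters by a priority queue kept as an
-- ascending sorted list keyed by (size, insertion index). Return-value equivalence only:
-- both Pythons mutate the input dict in place in the same way.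

-- ===== PORT A =====
-- loop bodies of A, as named helpers (inner: one redistributed item; outer: one overfilled cluster)
def pvBodyAInner (d : PySem.Dict Int (List Int)) (item : Int) : PySem.Dict Int (List Int) :=
  match PySem.List.min? d.keys (fun k => ((d.getD k []).length : Int)) with
  | some m => d.insert m (d.getD m [] ++ [item])
  | none => d

def pvBodyA (max_per_cluster : Int) (d : PySem.Dict Int (List Int)) (p : Int × List Int) : PySem.Dict Int (List Int) :=
  let over_items := d.getD p.1 []   -- Python aliasing: over_items IS the current clusters[over_id]
  let excess := PySem.List.slice over_items (some max_per_cluster) none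
  let d1 := d.insert p.1 (PySem.List.slice over_items none (some max_per_cluster))
  excess.foldl pvBodyAInner d1

-- A's 'underfilled' dict is computed (with a float threshold) but never used and cannot
-- raise: dead code, not ported. target_size keeps A's ZeroDivisionError on the empty
-- dict (floordiv? = none there), which Pre_ excludes.
def balance_clusters_py (clusters : List (Int × List Int)) (max_per_cluster : Int) : List (Int × List Int) :=
  let d0 : PySem.Dict Int (List Int) := PySem.Dict.ofList clusters
  let total_items : Int := (d0.values.map (fun c => (c.length : Int))).sum
  let n_clusters : Int := (d0.size : Int)
  let _target_size : Option Int := PySem.Int.floordiv? total_items n_clusters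
  let overfilled : List (Int × List Int) := d0.items.filter (fun p => decide (max_per_cluster < (p.2.length : Int)))
  let dfinal : PySem.Dict Int (List Int) := overfilled.foldl (pvBodyA max_per_cluster) d0
  dfinal.items

-- ===== PORT B =====
def pvLt (a b : Nat × Int × Int) : Bool :=
  a.1 < b.1 || (a.1 == b.1 && (a.2.1 < b.2.1 || (a.2.1 == b.2.1 && a.2.2 < b.2.2)))

def pvInsort (pq : List (Nat × Int × Int)) (e : Nat × Int × Int) : List (Nat × Int × Int) :=
  match pq with
  | [] => [e]
  | x :: xs => if pvLt e x then e :: x :: xs else x :: pvInsort xs e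

def pvRemoveIdx (pq : List (Nat × Int × Int)) (i : Int) : List (Nat × Int × Int) :=
  match pq with
  | [] => []
  | x :: xs => if x.2.1 == i then xs else x :: pvRemoveIdx xs i

def pvBodyBInner (st : PySem.Dict Int (List Int) × List (Nat × Int × Int)) (item : Int) :
    PySem.Dict Int (List Int) × List (Nat × Int × Int) :=
  match st.2 with
  | [] => st   -- unreachable: the queue always holds one entry per cluster
  | (size, j, kj) :: rest =>
    (st.1.insert kj (st.1.getD kj [] ++ [item]), pvInsort rest (size + 1, j, kj))

def pvBodyB (keys : List Int) (max_per_cluster : Int)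
    (st : PySem.Dict Int (List Int) × List (Nat × Int × Int)) (k : Int) :
    PySem.Dict Int (List Int) × List (Nat × Int × Int) :=
  let items := st.1.getD k []
  let excess := PySem.List.slice items (some max_per_cluster) none
  let d1 := st.1.insert k (PySem.List.slice items none (some max_per_cluster))
  let i : Int := ((PySem.List.index? keys k).getD 0 : Nat)
  let pq1 := pvInsort (pvRemoveIdx st.2 i) ((d1.getD k []).length, i, k)
  excess.foldl pvBodyBInner (d1, pq1)

def balance_clusters_py_alt (clusters : List (Int × List Int)) (max_per_cluster : Int) : List (Int × List Int) :=
  let d0 : PySem.Dict Int (List Int) := PySem.Dict.ofList clusters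
  let keys := d0.keys
  let overKeys : List Int := keys.filter (fun k => decide (max_per_cluster < ((d0.getD k []).length : Int)))
  -- Python sorts the triples lexicographically; the enumerate index is unique, so the
  -- third component never decides a comparison: sorting by (size, index) is exact here
  let pq0 : List (Nat × Int × Int) := PySem.List.sorted2
    ((PySem.List.enumerate keys 0).map (fun ik => ((d0.getD ik.2 []).length, ik.1, ik.2)))
    (fun e => e.1) (fun e => e.2.1)
  let st := overKeys.foldl (pvBodyB keys max_per_cluster) (d0, pq0)
  st.1.items

-- ===== PRECONDITION & SPEC =====
-- A divides by len(clusters): the empty dict raises ZeroDivisionError, so it is excluded.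
def Pre_balance_clusters_py (clusters : List (Int × List Int)) (max_per_cluster : Int) : Prop :=
  clusters ≠ []
instance (clusters : List (Int × List Int)) (max_per_cluster : Int) : Decidable (Pre_balance_clusters_py clusters max_per_cluster) := by unfold Pre_balance_clusters_py; infer_instance
def pvWitness_balance_clusters_py : (List (Int × List Int)) × Int := ([(1, [7, 8, 9]), (2, [])], 1)

def Spec_balance_clusters_py (clusters : List (Int × List Int)) (max_per_cluster : Int) (out : List (Int × List Int)) : Prop := out = balance_clusters_py_alt clusters max_per_cluster
instance (clusters : List (Int × List Int)) (max_per_cluster : Int) (out : List (Int × List Int)) : Decidable (Spec_balance_clusters_py clusters max_per_cluster out) := by unfold Spec_balance_clusters_py; infer_instance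

-- ===== CLAIM (what is proved, stated in full; the proofs are below) =====
def Claim_equal_balance_clusters_py : Prop := ∀ (clusters : List (Int × List Int)) (max_per_cluster : Int), Dom_balance_clusters_py clusters max_per_cluster → Pre_balance_clusters_py clusters max_per_cluster → Spec_balance_clusters_py clusters max_per_cluster (balance_clusters_py clusters max_per_cluster)
-- ===== LEMMAS AND PROOFS =====

-- the order the queue is kept in (on the first two components; the third never decides
-- a comparison because insertion indices are unique)
def pvLe (a b : Nat × Int × Int) : Prop := a.1 < b.1 ∨ (a.1 = b.1 ∧ a.2.1 ≤ b.2.1)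

lemma pvLe_trans {a b c : Nat × Int × Int} (h1 : pvLe a b) (h2 : pvLe b c) : pvLe a c := by
  unfold pvLe at *
  rcases h1 with h1 | ⟨e1, le1⟩ <;> rcases h2 with h2 | ⟨e2, le2⟩
  · exact Or.inl (h1.trans h2)
  · exact Or.inl (e2 ▸ h1)
  · exact Or.inl (e1 ▸ h2)
  · exact Or.inr ⟨e1.trans e2, le1.trans le2⟩

lemma pvLt_le {a b : Nat × Int × Int} (h : pvLt a b = true) : pvLe a b := by
  unfold pvLt at h; unfold pvLe
  simp only [Bool.or_eq_true, Bool.and_eq_true, decide_eq_true_eq, beq_iff_eq] at h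
  rcases h with h | ⟨h1, h2⟩
  · exact Or.inl h
  · rcases h2 with h2 | ⟨h3, _⟩ <;> exact Or.inr ⟨h1, by omega⟩

lemma pvNotLt_le {a b : Nat × Int × Int} (h : pvLt a b = false) : pvLe b a := by
  have hne : ¬ pvLt a b = true := by simp [h]
  unfold pvLe
  by_cases h1 : b.1 < a.1
  · exact Or.inl h1
  · right
    have hlt1 : ¬ a.1 < b.1 := fun hc => hne (by unfold pvLt; simp [hc])
    have he : a.1 = b.1 := by omega
    refine ⟨he.symm, ?_⟩
    have hlt2 : ¬ a.2.1 < b.2.1 := fun hc => hne (by unfold pvLt; simp [he, hc])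
    omega

lemma pvInsort_perm (pq : List (Nat × Int × Int)) (e : Nat × Int × Int) :
    (pvInsort pq e).Perm (e :: pq) := by
  induction pq with
  | nil => simp [pvInsort]
  | cons x xs ih =>
    unfold pvInsort
    split
    · exact List.Perm.refl _
    · exact (ih.cons x).trans (List.Perm.swap e x xs)

lemma pvInsort_pairwise {pq : List (Nat × Int × Int)} (e : Nat × Int × Int)
    (h : pq.Pairwise pvLe) : (pvInsort pq e).Pairwise pvLe := by
  induction pq with
  | nil => simp [pvInsort]
  | cons x xs ih =>
    rcases List.pairwise_cons.mp h with ⟨hx, hxs⟩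
    unfold pvInsort
    split
    case isTrue hlt =>
      refine List.pairwise_cons.mpr ⟨?_, h⟩
      intro y hy
      rcases List.mem_cons.mp hy with rfl | hy'
      · exact pvLt_le hlt
      · exact pvLe_trans (pvLt_le hlt) (hx y hy')
    case isFalse hlt =>
      have hf : pvLt e x = false := by revert hlt; cases pvLt e x <;> simp
      refine List.pairwise_cons.mpr ⟨?_, ih hxs⟩
      intro y hy
      rcases List.mem_cons.mp ((pvInsort_perm xs e).mem_iff.mp hy) with rfl | hy'
      · exact pvNotLt_le hf
      · exact hx y hy'

lemma pvRemoveIdx_sublist (pq : List (Nat × Int × Int)) (i : Int) :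
    (pvRemoveIdx pq i).Sublist pq := by
  induction pq with
  | nil => simp [pvRemoveIdx]
  | cons x xs ih =>
    unfold pvRemoveIdx
    split
    · exact List.sublist_cons_self x xs
    · exact ih.cons₂ x

lemma pvRemoveIdx_perm {pq : List (Nat × Int × Int)} {x : Nat × Int × Int} {i : Int}
    (hx : x ∈ pq) (hxi : x.2.1 = i) (hu : ∀ y ∈ pq, y.2.1 = i → y = x) :
    (x :: pvRemoveIdx pq i).Perm pq := by
  induction pq with
  | nil => cases hx
  | cons z t ih =>
    unfold pvRemoveIdx
    split
    case isTrue hb =>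
      have hz : z = x := hu z (List.mem_cons_self) (by simpa using hb)
      rw [hz]
    case isFalse hb =>
      have hzi : ¬ z.2.1 = i := by simpa using hb
      have hxz : x ≠ z := fun h => hzi (h ▸ hxi)
      have hx' : x ∈ t := by
        rcases List.mem_cons.mp hx with h | h
        · exact absurd h hxz
        · exact h
      have hperm := ih hx' (fun y hy hyi => hu y (List.mem_cons_of_mem _ hy) hyi)
      exact (List.Perm.swap z x _).trans (hperm.cons z)

-- the "graph" of the state: one (size, index, key) entry per cluster position
def pvEntry (d : PySem.Dict Int (List Int)) (keys : List Int) (i : Nat) : Nat × Int × Int :=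
  ((d.getD (keys.getD i 0) []).length, (i : Int), keys.getD i 0)

def pvGraph (d : PySem.Dict Int (List Int)) (keys : List Int) : List (Nat × Int × Int) :=
  (List.range keys.length).map (pvEntry d keys)

def pvGraphX (d : PySem.Dict Int (List Int)) (keys : List Int) (i : Nat) : List (Nat × Int × Int) :=
  ((List.range keys.length).erase i).map (pvEntry d keys)

lemma pvGraph_length (d : PySem.Dict Int (List Int)) (keys : List Int) :
    (pvGraph d keys).length = keys.length := by simp [pvGraph]

lemma pvMem_graph {d : PySem.Dict Int (List Int)} {keys : List Int} {e : Nat × Int × Int} :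
    e ∈ pvGraph d keys ↔ ∃ i, i < keys.length ∧ e = pvEntry d keys i := by
  simp only [pvGraph, List.mem_map, List.mem_range]
  constructor <;> rintro ⟨i, hi, he⟩ <;> exact ⟨i, hi, he.symm⟩

lemma pvGraph_perm {d : PySem.Dict Int (List Int)} {keys : List Int} {i : Nat}
    (hi : i < keys.length) :
    (pvGraph d keys).Perm (pvEntry d keys i :: pvGraphX d keys i) := by
  have h1 : (List.range keys.length).Perm (i :: (List.range keys.length).erase i) :=
    List.perm_cons_erase (List.mem_range.mpr hi)
  simpa [pvGraph, pvGraphX] using h1.map (pvEntry d keys)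

lemma pvGraphX_congr {d d' : PySem.Dict Int (List Int)} {keys : List Int} (i : Nat)
    (h : ∀ j, j < keys.length → j ≠ i → pvEntry d' keys j = pvEntry d keys j) :
    pvGraphX d' keys i = pvGraphX d keys i := by
  unfold pvGraphX
  apply List.map_congr_left
  intro j hj
  have hj' := (List.Nodup.mem_erase_iff (List.nodup_range)).mp hj
  exact h j (List.mem_range.mp hj'.2) hj'.1

-- Python's min(..., key=...) returns the FIRST element attaining the minimum
def pvMinG {α κ : Type} [LT κ] [DecidableLT κ] (key : α → κ) (acc x : α) : α :=
  if key x < key acc then x else acc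

lemma pvFoldMinG_mem {α κ : Type} [LT κ] [DecidableLT κ] (key : α → κ) :
    ∀ (l : List α) (a : α), l.foldl (pvMinG key) a ∈ a :: l := by
  intro l
  induction l with
  | nil => intro a; simp
  | cons x xs ih =>
    intro a
    simp only [List.foldl_cons]
    have hax : pvMinG key a x = a ∨ pvMinG key a x = x := by
      unfold pvMinG; split <;> simp
    rcases List.mem_cons.mp (ih (pvMinG key a x)) with h | h
    · rw [h]
      rcases hax with h' | h' <;> rw [h']
      · exact List.mem_cons_self
      · exact List.mem_cons_of_mem _ (List.mem_cons_self)
    · exact List.mem_cons_of_mem _ (List.mem_cons_of_mem _ h)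

lemma pvFoldMinG_fix {α κ : Type} [LT κ] [DecidableLT κ] (key : α → κ) :
    ∀ (l : List α) (a : α), (∀ y ∈ l, ¬ key y < key a) → l.foldl (pvMinG key) a = a := by
  intro l
  induction l with
  | nil => intro a _; rfl
  | cons x xs ih =>
    intro a h
    simp only [List.foldl_cons]
    have hx : pvMinG key a x = a := by
      unfold pvMinG; rw [if_neg (h x List.mem_cons_self)]
    rw [hx]
    exact ih a (fun y hy => h y (List.mem_cons_of_mem _ hy))

lemma pvMin?_step {α κ : Type} [LT κ] [DecidableLT κ] (key : α → κ) (a x : α) (l : List α) :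
    PySem.List.min? (a :: x :: l) key = PySem.List.min? (pvMinG key a x :: l) key := by
  unfold PySem.List.min? pvMinG
  simp only [List.foldl_cons]
  by_cases h : key x < key a <;> simp [h]

lemma pvMin?_cons {α κ : Type} [LT κ] [DecidableLT κ] (key : α → κ) :
    ∀ (l : List α) (a : α), PySem.List.min? (a :: l) key = some (l.foldl (pvMinG key) a) := by
  intro l
  induction l with
  | nil => intro a; rfl
  | cons x xs ih =>
    intro a
    rw [pvMin?_step, ih]
    simp only [List.foldl_cons]

lemma pvMin?_first {α κ : Type} [LT κ] [DecidableLT κ] (key : α → κ) (l r : List α) (m : α)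
    (hl : ∀ y ∈ l, key m < key y) (hr : ∀ y ∈ r, ¬ key y < key m) :
    PySem.List.min? (l ++ m :: r) key = some m := by
  cases l with
  | nil =>
    rw [List.nil_append, pvMin?_cons, pvFoldMinG_fix key r m hr]
  | cons c l' =>
    rw [List.cons_append, pvMin?_cons, List.foldl_append]
    have hmem : l'.foldl (pvMinG key) c ∈ c :: l' := pvFoldMinG_mem key l' c
    have hma : key m < key (l'.foldl (pvMinG key) c) := hl _ hmem
    simp only [List.foldl_cons]
    have hgm : pvMinG key (l'.foldl (pvMinG key) c) m = m := if_pos hma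
    rw [hgm, pvFoldMinG_fix key r m hr]

-- the simulation invariant: the queue is a sorted permutation of the state's graph
def pvInv (keys : List Int) (st : PySem.Dict Int (List Int) × List (Nat × Int × Int)) : Prop :=
  st.1.keys = keys ∧ st.2.Perm (pvGraph st.1 keys) ∧ st.2.Pairwise pvLe

-- the head of the queue is exactly Python's min(clusters.keys(), key=len ∘ lookup)
lemma pvSelect {keys : List Int} (nd : keys.Nodup) {d : PySem.Dict Int (List Int)}
    {s : Nat} {j kj : Int} {rest : List (Nat × Int × Int)}
    (hperm : (((s, j, kj) : Nat × Int × Int) :: rest).Perm (pvGraph d keys))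
    (hpair : (((s, j, kj) : Nat × Int × Int) :: rest).Pairwise pvLe) :
    ∃ i : Nat, i < keys.length ∧ j = (i : Int) ∧ kj = keys.getD i 0 ∧
      s = (d.getD kj []).length ∧
      PySem.List.min? keys (fun k => ((d.getD k []).length : Int)) = some kj := by
  have hmem : ((s, j, kj) : Nat × Int × Int) ∈ pvGraph d keys :=
    hperm.mem_iff.mp List.mem_cons_self
  obtain ⟨i, hi, he⟩ := pvMem_graph.mp hmem
  have hj : j = (i : Int) := congrArg (fun e => e.2.1) he
  have hkj : kj = keys.getD i 0 := congrArg (fun e => e.2.2) he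
  have hs : s = (d.getD (keys.getD i 0) []).length := congrArg (fun e => e.1) he
  have hskj : s = (d.getD kj []).length := by rw [hkj]; exact hs
  refine ⟨i, hi, hj, hkj, hskj, ?_⟩
  have hhead : ∀ e ∈ pvGraph d keys, e ≠ (s, j, kj) → pvLe (s, j, kj) e := by
    intro e hea hne
    rcases List.mem_cons.mp (hperm.mem_iff.mpr hea) with h | h
    · exact absurd h hne
    · exact (List.pairwise_cons.mp hpair).1 e h
  have hkeys : keys = keys.take i ++ kj :: keys.drop (i + 1) := by
    conv_lhs => rw [← List.take_append_drop i keys]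
    congr 1
    rw [← List.getElem_cons_drop hi]
    congr 1
    rw [hkj, List.getD_eq_getElem _ _ hi]
  have hlt : ∀ y ∈ keys.take i,
      ((d.getD kj []).length : Int) < ((d.getD y []).length : Int) := by
    intro y hy
    obtain ⟨i', hmin, hy'⟩ := List.mem_take_iff_getElem.mp hy
    have hii : i' < i := lt_of_lt_of_le hmin (min_le_left _ _)
    have hi' : i' < keys.length := lt_of_lt_of_le hmin (min_le_right _ _)
    have hne : pvEntry d keys i' ≠ (s, j, kj) := by
      intro hcon
      have h2 := congrArg (fun e => e.2.1) hcon
      simp only [pvEntry, hj] at h2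
      have : i' = i := by exact_mod_cast h2
      omega
    have hle := hhead _ (pvMem_graph.mpr ⟨i', hi', rfl⟩) hne
    unfold pvLe pvEntry at hle
    dsimp only at hle
    have hstrict : s < (d.getD (keys.getD i' 0) []).length := by
      rcases hle with h | ⟨h1, h2⟩
      · exact h
      · exfalso
        rw [hj] at h2
        have : i ≤ i' := by exact_mod_cast h2
        omega
    have hyy : keys.getD i' 0 = y := by rw [List.getD_eq_getElem _ _ hi']; exact hy'
    have : (d.getD kj []).length < (d.getD y []).length := by
      rw [← hskj, ← hyy]; exact hstrict
    exact_mod_cast this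
  have hle2 : ∀ y ∈ keys.drop (i + 1),
      ((d.getD kj []).length : Int) ≤ ((d.getD y []).length : Int) := by
    intro y hy
    obtain ⟨i'', hmem2, hy'⟩ := List.mem_drop_iff_getElem.mp hy
    have hi' : i + 1 + i'' < keys.length := by omega
    have hne : pvEntry d keys (i + 1 + i'') ≠ (s, j, kj) := by
      intro hcon
      have h2 := congrArg (fun e => e.2.1) hcon
      simp only [pvEntry, hj] at h2
      have : i + 1 + i'' = i := by exact_mod_cast h2
      omega
    have hle := hhead _ (pvMem_graph.mpr ⟨i + 1 + i'', hi', rfl⟩) hne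
    unfold pvLe pvEntry at hle
    dsimp only at hle
    have hwk : s ≤ (d.getD (keys.getD (i + 1 + i'') 0) []).length := by
      rcases hle with h | ⟨h1, _⟩
      · omega
      · omega
    have hyy : keys.getD (i + 1 + i'') 0 = y := by
      rw [List.getD_eq_getElem _ _ hi']; exact hy'
    have : (d.getD kj []).length ≤ (d.getD y []).length := by
      rw [← hskj, ← hyy]; exact hwk
    exact_mod_cast this
  rw [hkeys]
  exact pvMin?_first _ _ _ _ hlt (fun y hy => not_lt.mpr (hle2 y hy))

-- inserting a new value at position i keeps the invariant
lemma pvUpdate_inv {keys : List Int} (nd : keys.Nodup) {d : PySem.Dict Int (List Int)}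
    (hk : d.keys = keys) {i : Nat} (hi : i < keys.length) (v : List Int) {n : Nat}
    {pqx : List (Nat × Int × Int)} (hn : n = v.length)
    (hperm : pqx.Perm (pvGraphX d keys i)) (hpair : pqx.Pairwise pvLe) :
    pvInv keys (d.insert (keys.getD i 0) v, pvInsort pqx (n, (i : Int), keys.getD i 0)) := by
  have hkmem : keys.getD i 0 ∈ keys := by
    rw [List.getD_eq_getElem _ _ hi]; exact List.getElem_mem _
  have hcont : d.contains (keys.getD i 0) = true :=
    (PySem.Dict.contains_iff_mem_keys d _).mpr (hk ▸ hkmem)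
  refine ⟨by rw [PySem.Dict.keys_insert_of_contains d v hcont, hk], ?_, pvInsort_pairwise _ hpair⟩
  have hoff : ∀ j, j < keys.length → j ≠ i →
      pvEntry (d.insert (keys.getD i 0) v) keys j = pvEntry d keys j := by
    intro j hjl hne
    unfold pvEntry
    have hneq : keys.getD j 0 ≠ keys.getD i 0 := by
      rw [List.getD_eq_getElem _ _ hjl, List.getD_eq_getElem _ _ hi]
      exact fun hcon => hne (nd.getElem_inj_iff.mp hcon)
    rw [PySem.Dict.getD_insert_of_ne _ _ _ hneq]
  have hei : pvEntry (d.insert (keys.getD i 0) v) keys i = (n, (i : Int), keys.getD i 0) := by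
    unfold pvEntry
    rw [PySem.Dict.getD_insert_self, hn]
  refine (pvInsort_perm _ _).trans ((hperm.cons _).trans ?_)
  rw [← pvGraphX_congr i hoff, ← hei]
  exact (pvGraph_perm hi).symm

-- one redistributed item: A's min-scan step equals B's pop-head step, invariant kept
lemma pvInner_step {keys : List Int} (nd : keys.Nodup) (hkne : keys ≠ [])
    {d : PySem.Dict Int (List Int)} {pq : List (Nat × Int × Int)}
    (hinv : pvInv keys (d, pq)) (item : Int) :
    pvBodyAInner d item = (pvBodyBInner (d, pq) item).1 ∧
    pvInv keys (pvBodyBInner (d, pq) item) := by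
  obtain ⟨hk, hperm, hpair⟩ := hinv
  cases pq with
  | nil =>
    exfalso
    have hlen := hperm.length_eq
    simp only [List.length_nil, pvGraph_length] at hlen
    exact hkne (List.eq_nil_of_length_eq_zero hlen.symm)
  | cons h rest =>
    obtain ⟨s, j, kj⟩ := h
    obtain ⟨i, hi, hj, hkj, hs, hmin⟩ := pvSelect nd hperm hpair
    have heq : pvBodyAInner d item = (pvBodyBInner (d, (s, j, kj) :: rest) item).1 := by
      unfold pvBodyAInner pvBodyBInner
      rw [hk, hmin]
    refine ⟨heq, ?_⟩
    unfold pvBodyBInner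
    dsimp only
    subst hj hkj
    have hrest : rest.Perm (pvGraphX d keys i) := by
      have h1 := hperm.trans (pvGraph_perm hi)
      have hhead : pvEntry d keys i = (s, (i : Int), keys.getD i 0) := by
        unfold pvEntry; rw [← hs]
      rw [hhead] at h1
      exact h1.cons_inv
    have hlen : s + 1 = (d.getD (keys.getD i 0) [] ++ [item]).length := by
      rw [List.length_append, List.length_cons, List.length_nil, hs]
    exact pvUpdate_inv nd hk hi _ hlen hrest (List.pairwise_cons.mp hpair).2

-- the inner fold over the excess items
lemma pvInnerFold {keys : List Int} (nd : keys.Nodup) (hkne : keys ≠ []) :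
    ∀ (ex : List Int) (d : PySem.Dict Int (List Int)) (pq : List (Nat × Int × Int)),
      pvInv keys (d, pq) →
      ex.foldl pvBodyAInner d = (ex.foldl pvBodyBInner (d, pq)).1 ∧
      pvInv keys (ex.foldl pvBodyBInner (d, pq)) := by
  intro ex
  induction ex with
  | nil => intro d pq h; exact ⟨rfl, h⟩
  | cons x xs ih =>
    intro d pq h
    obtain ⟨h1, h2⟩ := pvInner_step nd hkne h x
    simp only [List.foldl_cons]
    obtain ⟨ha, hb⟩ := ih (pvBodyBInner (d, pq) x).1 (pvBodyBInner (d, pq) x).2 h2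
    exact ⟨by rw [h1]; exact ha, hb⟩

-- one overfilled cluster: A's body equals B's body, invariant kept
lemma pvOuter_step {keys : List Int} (nd : keys.Nodup) (hkne : keys ≠ [])
    (max_per_cluster : Int) {d : PySem.Dict Int (List Int)} {pq : List (Nat × Int × Int)}
    (hinv : pvInv keys (d, pq)) (p : Int × List Int) (hp : p.1 ∈ keys) :
    pvBodyA max_per_cluster d p = (pvBodyB keys max_per_cluster (d, pq) p.1).1 ∧
    pvInv keys (pvBodyB keys max_per_cluster (d, pq) p.1) := by
  obtain ⟨hk, hperm, hpair⟩ := hinv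
  have hsome : (PySem.List.index? keys p.1).isSome :=
    (PySem.List.index?_isSome_iff keys p.1).mpr hp
  obtain ⟨i0, hidx⟩ := Option.isSome_iff_exists.mp hsome
  obtain ⟨hi0, hkey, -⟩ := PySem.List.getElem_of_index?_eq_some hidx
  have hgetD : keys.getD i0 0 = p.1 := by
    rw [List.getD_eq_getElem _ _ hi0]; exact hkey
  have hx : pvEntry d keys i0 ∈ pq := hperm.mem_iff.mpr (pvMem_graph.mpr ⟨i0, hi0, rfl⟩)
  have hu : ∀ y ∈ pq, y.2.1 = ((i0 : Nat) : Int) → y = pvEntry d keys i0 := by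
    intro y hy hyi
    obtain ⟨iy, hiy, hey⟩ := pvMem_graph.mp (hperm.mem_iff.mp hy)
    have h1 : ((iy : Nat) : Int) = ((i0 : Nat) : Int) := by rw [hey] at hyi; exact hyi
    have h2 : iy = i0 := by exact_mod_cast h1
    rw [hey, h2]
  have hremperm : (pvRemoveIdx pq ((i0 : Nat) : Int)).Perm (pvGraphX d keys i0) := by
    have h1 : (pvEntry d keys i0 :: pvRemoveIdx pq ((i0 : Nat) : Int)).Perm pq :=
      pvRemoveIdx_perm hx rfl hu
    exact (h1.trans (hperm.trans (pvGraph_perm hi0))).cons_inv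
  have hrempair : (pvRemoveIdx pq ((i0 : Nat) : Int)).Pairwise pvLe :=
    hpair.sublist (pvRemoveIdx_sublist pq _)
  have hinv1 := pvUpdate_inv nd hk hi0
      (PySem.List.slice (d.getD p.1 []) none (some max_per_cluster))
      (n := ((d.insert (keys.getD i0 0)
        (PySem.List.slice (d.getD p.1 []) none (some max_per_cluster))).getD (keys.getD i0 0) []).length)
      (by rw [PySem.Dict.getD_insert_self]) hremperm hrempair
  rw [hgetD] at hinv1
  unfold pvBodyB
  dsimp only
  rw [hidx]
  exact pvInnerFold nd hkne _ _ _ hinv1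

-- the outer fold over the overfilled clusters
lemma pvOuterFold {keys : List Int} (nd : keys.Nodup) (hkne : keys ≠ [])
    (max_per_cluster : Int) :
    ∀ (ps : List (Int × List Int)) (d : PySem.Dict Int (List Int)) (pq : List (Nat × Int × Int)),
      (∀ p ∈ ps, p.1 ∈ keys) → pvInv keys (d, pq) →
      ps.foldl (pvBodyA max_per_cluster) d
        = (ps.foldl (fun st p => pvBodyB keys max_per_cluster st p.1) (d, pq)).1 ∧
      pvInv keys (ps.foldl (fun st p => pvBodyB keys max_per_cluster st p.1) (d, pq)) := by
  intro ps
  induction ps with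
  | nil => intro d pq _ h; exact ⟨rfl, h⟩
  | cons p ps ih =>
    intro d pq hmem h
    obtain ⟨h1, h2⟩ := pvOuter_step nd hkne max_per_cluster h p (hmem p List.mem_cons_self)
    simp only [List.foldl_cons]
    obtain ⟨ha, hb⟩ := ih (pvBodyB keys max_per_cluster (d, pq) p.1).1
      (pvBodyB keys max_per_cluster (d, pq) p.1).2
      (fun q hq => hmem q (List.mem_cons_of_mem _ hq)) h2
    exact ⟨by rw [h1]; exact ha, hb⟩

-- building the initial queue by repeated insertion
lemma pvInsertBy_pairwise {before : (Nat × Int × Int) → (Nat × Int × Int) → Bool}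
    (h1 : ∀ a b, before a b = true → pvLe a b)
    (h2 : ∀ a b, before a b = false → pvLe b a)
    (e : Nat × Int × Int) : ∀ {l : List (Nat × Int × Int)}, l.Pairwise pvLe →
      (PySem.List.insertBy before e l).Pairwise pvLe := by
  intro l
  induction l with
  | nil =>
    intro _
    rw [show PySem.List.insertBy before e [] = [e] from rfl]
    simp
  | cons x xs ih =>
    intro h
    rcases List.pairwise_cons.mp h with ⟨hx, hxs⟩
    rw [show PySem.List.insertBy before e (x :: xs)
        = if before e x = true then e :: x :: xs else x :: PySem.List.insertBy before e xs from rfl]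
    split
    case isTrue hb =>
      refine List.pairwise_cons.mpr ⟨?_, h⟩
      intro y hy
      rcases List.mem_cons.mp hy with rfl | hy'
      · exact h1 _ _ hb
      · exact pvLe_trans (h1 _ _ hb) (hx y hy')
    case isFalse hb =>
      have hf : before e x = false := by revert hb; cases before e x <;> simp
      refine List.pairwise_cons.mpr ⟨?_, ih hxs⟩
      intro y hy
      rcases List.mem_cons.mp ((PySem.List.insertBy_perm before e xs).mem_iff.mp hy) with rfl | hy'
      · exact h2 _ _ hf
      · exact hx y hy'

lemma pvFoldInsertBy_pairwise {before : (Nat × Int × Int) → (Nat × Int × Int) → Bool}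
    (h1 : ∀ a b, before a b = true → pvLe a b)
    (h2 : ∀ a b, before a b = false → pvLe b a) :
    ∀ (l acc : List (Nat × Int × Int)), acc.Pairwise pvLe →
      (List.foldl (fun acc x => PySem.List.insertBy before x acc) acc l).Pairwise pvLe := by
  intro l
  induction l with
  | nil => intro acc h; exact h
  | cons x xs ih =>
    intro acc h
    simp only [List.foldl_cons]
    exact ih _ (pvInsertBy_pairwise h1 h2 x h)

lemma pvBefore_true (a b : Nat × Int × Int)
    (h : (decide (a.1 < b.1) || (!decide (b.1 < a.1) && decide (a.2.1 < b.2.1))) = true) :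
    pvLe a b := by
  unfold pvLe
  simp only [Bool.or_eq_true, Bool.and_eq_true, Bool.not_eq_true', decide_eq_true_eq,
    decide_eq_false_iff_not] at h
  rcases h with h | ⟨h1, h2⟩
  · exact Or.inl h
  · by_cases hab : a.1 < b.1
    · exact Or.inl hab
    · exact Or.inr ⟨by omega, by omega⟩

lemma pvBefore_false (a b : Nat × Int × Int)
    (h : (decide (a.1 < b.1) || (!decide (b.1 < a.1) && decide (a.2.1 < b.2.1))) = false) :
    pvLe b a := by
  have hne : ¬ (decide (a.1 < b.1) || (!decide (b.1 < a.1) && decide (a.2.1 < b.2.1))) = true := by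
    simp [h]
  unfold pvLe
  by_cases h1 : b.1 < a.1
  · exact Or.inl h1
  · right
    have hlt1 : ¬ a.1 < b.1 := fun hc => hne (by simp [hc])
    have hlt2 : ¬ a.2.1 < b.2.1 := fun hc => hne (by simp [h1, hc])
    exact ⟨by omega, by omega⟩

-- the sorted initial queue is ordered by pvLe
lemma pvSorted2_pairwise (xs : List (Nat × Int × Int)) :
    (PySem.List.sorted2 xs (fun e => e.1) (fun e => e.2.1)).Pairwise pvLe := by
  exact pvFoldInsertBy_pairwise pvBefore_true pvBefore_false xs [] List.Pairwise.nil

lemma pvInitGraph (d0 : PySem.Dict Int (List Int)) :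
    (PySem.List.enumerate d0.keys 0).map
        (fun ik => (((d0.getD ik.2 []).length : Nat), ik.1, ik.2)) = pvGraph d0 d0.keys := by
  apply List.ext_getElem
  · simp [pvGraph, PySem.List.length_enumerate]
  · intro i h1 h2
    have hi : i < d0.keys.length := by
      simpa [PySem.List.length_enumerate] using h1
    simp only [List.getElem_map, PySem.List.getElem_enumerate, pvGraph, List.getElem_range]
    unfold pvEntry
    rw [List.getD_eq_getElem _ _ hi]
    simp

-- ===== VERDICT helpers: top-level assembly =====
theorem balance_clusters_py_spec : Claim_equal_balance_clusters_py := by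
  unfold Claim_equal_balance_clusters_py
  intro clusters max_per_cluster _hdom hpre
  unfold Spec_balance_clusters_py
  unfold balance_clusters_py balance_clusters_py_alt
  dsimp only
  set d0 := PySem.Dict.ofList clusters with hd0
  have nd : d0.keys.Nodup := PySem.Dict.nodup_keys_ofList clusters
  -- the key list is nonempty
  have hkne : d0.keys ≠ [] := by
    obtain ⟨c, t, rfl⟩ := List.exists_cons_of_ne_nil hpre
    have hkeys : d0.keys = PySem.Set.update PySem.Dict.empty.keys (((c :: t) : List (Int × List Int)).map Prod.fst) :=
      PySem.Dict.keys_foldl_insert_key (c :: t) Prod.fst (fun _ p => p.2) PySem.Dict.empty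
    have hmem : c.1 ∈ d0.keys := by
      rw [hkeys]
      exact (PySem.Set.mem_update _ _ _).mpr (Or.inr (by simp))
    exact List.ne_nil_of_mem hmem
  -- the two "overfilled" lists coincide
  have hitems : d0.items = d0.keys.map (fun k => (k, d0.getD k [])) :=
    PySem.Dict.items_eq_map_keys d0 nd []
  have hover : (d0.keys.filter (fun k => decide (max_per_cluster < ((d0.getD k []).length : Int))))
      = (d0.items.filter (fun p => decide (max_per_cluster < (p.2.length : Int)))).map Prod.fst := by
    rw [hitems, List.filter_map, List.map_map]
    simp only [Function.comp_def]
    rw [List.map_id']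
  -- the initial invariant
  have hinit : pvInv d0.keys (d0, PySem.List.sorted2
      ((PySem.List.enumerate d0.keys 0).map (fun ik => (((d0.getD ik.2 []).length : Nat), ik.1, ik.2)))
      (fun e => e.1) (fun e => e.2.1)) := by
    refine ⟨rfl, ?_, ?_⟩
    · refine (PySem.List.sorted2_perm _ _ _ false).trans ?_
      rw [pvInitGraph]
    · exact pvSorted2_pairwise _
  -- the members of the overfilled list are keys
  have hps : ∀ p ∈ d0.items.filter (fun p => decide (max_per_cluster < (p.2.length : Int))),
      p.1 ∈ d0.keys := by
    intro p hpmem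
    exact PySem.Dict.mem_keys_of_mem_items d0 (List.mem_of_mem_filter hpmem)
  have hmain := pvOuterFold nd hkne max_per_cluster
    (d0.items.filter (fun p => decide (max_per_cluster < (p.2.length : Int)))) d0
    (PySem.List.sorted2
      ((PySem.List.enumerate d0.keys 0).map (fun ik => (((d0.getD ik.2 []).length : Nat), ik.1, ik.2)))
      (fun e => e.1) (fun e => e.2.1))
    hps hinit
  rw [hover, List.foldl_map]
  exact congrArg PySem.Dict.items hmain.1
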